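-- pv_equiv track=rewrite | github.com/teddymarchildon/RecommendationSystem | RecommendationSystem/RecommenderEngine.py | matchWithZero
-- ===== SOURCE A (Python) =====
-- def matchWithZero(list, dict):
--     '''
--     This function is the same as the match function above, but it includes zeros
--     '''
--     d = {}
--     for i in range(len(list)):
--         for key in dict:
--             if list[i] not in d:
--                 d[list[i]] = dict[key][i]
--             else:
--                 d[list[i]] += dict[key][i]
--     return d
-- ===== SOURCE B (Python) =====
-- def matchWithZero(list, dict):
--     '''
--     Group-by rewrite: bucket the indices by name first, then compute each
--     name's total in one shot over dict.values() and its index bucket.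
--     '''
--     if not dict:
--         return {}
--     positions = {}
--     for i, name in enumerate(list):
--         positions[name] = positions.get(name, []) + [i]
--     d = {}
--     for name, idxs in positions.items():
--         d[name] = sum(vals[i] for vals in dict.values() for i in idxs)
--     return d
-- ===== Notes on version B (the rewrite author's own statement) =====
-- stated objective: alternative
-- what changed: A streams over indices with a per-(i,key) set-or-add branch into the result dict; B is a group-by-then-aggregate: it first buckets the indices by name into a positions dict, then computes each distinct name's total in one nested sum over dict.values() and its index bucket (with an early return for an empty dict).
import Mathlib
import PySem

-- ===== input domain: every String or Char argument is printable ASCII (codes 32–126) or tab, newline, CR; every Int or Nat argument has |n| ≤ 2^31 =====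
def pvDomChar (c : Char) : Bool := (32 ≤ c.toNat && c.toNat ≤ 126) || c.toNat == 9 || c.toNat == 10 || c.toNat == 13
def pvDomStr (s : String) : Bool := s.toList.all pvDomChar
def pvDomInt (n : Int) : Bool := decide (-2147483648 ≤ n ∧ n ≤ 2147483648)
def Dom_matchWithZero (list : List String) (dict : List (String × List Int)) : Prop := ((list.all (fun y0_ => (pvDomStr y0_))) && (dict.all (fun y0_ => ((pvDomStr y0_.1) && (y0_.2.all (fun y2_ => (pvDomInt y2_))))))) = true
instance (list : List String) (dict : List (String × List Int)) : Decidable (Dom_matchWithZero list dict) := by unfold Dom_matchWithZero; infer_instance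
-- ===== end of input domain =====

-- B replaces A's per-(index,key) set-or-add streaming with a group-by: bucket indices by name, then one nested sum per distinct name (objective: alternative).

-- ===== PORT A =====
-- for i in range(len(list)): for key in dict: set/add d[list[i]] by dict[key][i].
-- i comes from range(len(list)) so list[i] never raises; pyGetD "" is exact there.
-- dict[key][i] is ported via Dict.get? on the association list; the [i] index is
-- pyGetD with default 0, exact under Pre_ (every value list has length ≥ len(list)).
def matchWithZero (list : List String) (dict : List (String × List Int)) : List (String × Int) :=
  ((PySem.List.pyRange 0 (list.length : Int) 1).foldl
    (fun d i =>
      (dict.map Prod.fst).foldl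
        (fun d key =>
          let x := PySem.List.pyGetD list i ""
          let v := PySem.List.pyGetD (((PySem.Dict.mk dict).get? key).getD []) i 0
          if d.contains x = false then d.insert x v
          else d.insert x (d.getD x 0 + v))
        d)
    (PySem.Dict.empty : PySem.Dict String Int)).items

-- ===== PORT B =====
-- if not dict: return {};
-- positions: for i, name in enumerate(list): positions[name] = positions.get(name, []) + [i];
-- then for name, idxs in positions.items(): d[name] = sum(vals[i] for vals in dict.values() for i in idxs).
def matchWithZero_alt (list : List String) (dict : List (String × List Int)) : List (String × Int) :=
  if dict.isEmpty then []
  else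
    ((((PySem.List.enumerate list).foldl
      (fun d p => d.insert p.2 (d.getD p.2 [] ++ [p.1]))
      (PySem.Dict.empty : PySem.Dict String (List Int))).items).foldl
      (fun d p =>
        d.insert p.1
          ((dict.map Prod.snd).foldl
            (fun t vals => t + p.2.foldl (fun t i => t + PySem.List.pyGetD vals i 0) 0) 0))
      (PySem.Dict.empty : PySem.Dict String Int)).items

-- ===== PRECONDITION & SPEC =====
-- Pre_ excludes (a) inputs where some value list is shorter than `list`, on which the Python A
-- raises IndexError, and (b) association lists with duplicate keys, which a Python dict can
-- never represent (so no Python-reachable input is excluded by (b)).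
def Pre_matchWithZero (list : List String) (dict : List (String × List Int)) : Prop :=
  (dict.map Prod.fst).Nodup ∧ ∀ kv ∈ dict, list.length ≤ kv.2.length
instance (list : List String) (dict : List (String × List Int)) : Decidable (Pre_matchWithZero list dict) := by unfold Pre_matchWithZero; infer_instance

def pvWitness_matchWithZero : List String × (List (String × List Int)) :=
  (["a", "b", "a"], [("x", [1, 2, 3]), ("y", [10, 20, 30])])

def Spec_matchWithZero (list : List String) (dict : List (String × List Int)) (out : List (String × Int)) : Prop := out = matchWithZero_alt list dict
instance (list : List String) (dict : List (String × List Int)) (out : List (String × Int)) : Decidable (Spec_matchWithZero list dict out) := by unfold Spec_matchWithZero; infer_instance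

-- ===== CLAIM (what is proved, stated in full; the proofs are below) =====
def Claim_equal_matchWithZero : Prop := ∀ (list : List String) (dict : List (String × List Int)), Dom_matchWithZero list dict → Pre_matchWithZero list dict → Spec_matchWithZero list dict (matchWithZero list dict)

-- ===== LEMMAS AND PROOFS =====

-- the column sum at index k, the quantity both programs accumulate per occurrence
def pvW (dict : List (String × List Int)) (k : Nat) : Int :=
  ((dict.map Prod.snd).map (fun vals => PySem.List.pyGetD vals (k : Int) 0)).sum

-- once the key x is present, every remaining step of A's inner loop takes the += branch,
-- and the inserts collapse into one insert of the accumulated sum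
theorem pvFoldStep_from_insert (w : String × List Int → Int) :
    ∀ (es : List (String × List Int)) (d : PySem.Dict String Int) (x : String) (v : Int),
      es.foldl
        (fun d kv => if d.contains x = false then d.insert x (w kv)
                     else d.insert x (d.getD x 0 + w kv))
        (d.insert x v)
      = d.insert x (v + (es.map w).sum) := by
  intro es
  induction es with
  | nil => intro d x v; simp
  | cons e es ih =>
    intro d x v
    simp only [List.foldl_cons, PySem.Dict.contains_insert_self, Bool.true_eq_false, if_false,
      PySem.Dict.getD_insert_self, PySem.Dict.insert_insert_self, ih, List.map_cons, List.sum_cons]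
    ring_nf

-- A's inner loop over a nonempty dict equals one accumulate of the column total
theorem pvInner_eq (w : String × List Int → Int) (es : List (String × List Int))
    (hne : es ≠ []) (d : PySem.Dict String Int) (x : String) :
    es.foldl
      (fun d kv => if d.contains x = false then d.insert x (w kv)
                   else d.insert x (d.getD x 0 + w kv))
      d
    = d.insert x (d.getD x 0 + (es.map w).sum) := by
  cases es with
  | nil => exact absurd rfl hne
  | cons e es =>
    simp only [List.foldl_cons, List.map_cons, List.sum_cons]
    by_cases h : d.contains x = false
    · rw [if_pos h, pvFoldStep_from_insert, PySem.Dict.getD_of_not_contains d 0 h]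
      ring_nf
    · rw [if_neg h, pvFoldStep_from_insert]
      ring_nf

theorem pvFoldl_const {α β : Type} (l : List α) (d : β) : l.foldl (fun d _ => d) d = d := by
  induction l generalizing d with
  | nil => rfl
  | cons a l ih => exact ih d

-- getD through a generic group-accumulate loop keyed by the pair's first component:
-- the value at x is g folded over the payloads keyed x, starting from the initial value
theorem pvGroupGetD {v : Type} (dv : v) (g : v -> Int -> v) (qs : List (String × Int)) :
    ∀ (d : PySem.Dict String v) (x : String),
      (qs.foldl (fun d p => d.insert p.1 (g (d.getD p.1 dv) p.2)) d).getD x dv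
        = ((qs.filter (fun p => p.1 == x)).map (·.2)).foldl g (d.getD x dv) := by
  induction qs with
  | nil => intro d x; simp
  | cons p qs ih =>
    intro d x
    simp only [List.foldl_cons, ih, List.filter_cons]
    by_cases h : p.1 = x
    · simp [h]
    · simp [h, PySem.Dict.getD_insert, Ne.symm h]

-- items of the group-accumulate loop from empty: distinct keys in first-occurrence order,
-- each paired with g folded over its payloads
theorem pvGroupItems {v : Type} (dv : v) (g : v -> Int -> v) (qs : List (String × Int)) :
    ((qs.foldl (fun d p => d.insert p.1 (g (d.getD p.1 dv) p.2)) (PySem.Dict.empty : PySem.Dict String v)).items)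
      = (PySem.Set.ofList (qs.map Prod.fst)).map
          (fun x => (x, ((qs.filter (fun p => p.1 == x)).map (·.2)).foldl g dv)) := by
  have hk : ((qs.foldl (fun d p => d.insert p.1 (g (d.getD p.1 dv) p.2)) (PySem.Dict.empty : PySem.Dict String v)).keys)
      = PySem.Set.ofList (qs.map Prod.fst) := by
    rw [PySem.Dict.keys_foldl_insert_key qs Prod.fst (fun d p => g (d.getD p.1 dv) p.2)]
    simp [PySem.Set.update_nil_left]
  have hnd : ((qs.foldl (fun d p => d.insert p.1 (g (d.getD p.1 dv) p.2)) (PySem.Dict.empty : PySem.Dict String v)).keys).Nodup := by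
    apply PySem.Dict.nodup_keys_foldl_insert_key qs Prod.fst (fun d p => g (d.getD p.1 dv) p.2)
    simp
  rw [PySem.Dict.items_eq_map_keys _ hnd dv, hk]
  apply List.map_congr_left
  intro x _
  rw [pvGroupGetD dv g qs PySem.Dict.empty x]
  simp

-- exchanging a double list sum
theorem pvSumComm {a b : Type} (l1 : List a) (l2 : List b) (f : a -> b -> Int) :
    (l1.map (fun x => (l2.map (fun y => f x y)).sum)).sum
      = (l2.map (fun y => (l1.map (fun x => f x y)).sum)).sum := by
  induction l1 with
  | nil => simp
  | cons x l1 ih =>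
    simp only [List.map_cons, List.sum_cons, ih, ← PySem.List.sum_map_add_int]

theorem matchWithZero_spec_aux (list : List String) (dict : List (String × List Int))
    (hnd : (dict.map Prod.fst).Nodup) :
    matchWithZero list dict = matchWithZero_alt list dict := by
  unfold matchWithZero matchWithZero_alt
  cases hdict : dict with
  | nil =>
    simp only [List.isEmpty_nil, if_true, List.map_nil, List.foldl_nil]
    rw [pvFoldl_const]
    rfl
  | cons e0 es0 =>
    rw [← hdict]
    have hne : dict ≠ [] := by rw [hdict]; simp
    have hEmp : dict.isEmpty = false := by rw [hdict]; rfl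
    rw [hEmp, if_neg (by simp)]
    -- A: collapse the inner key loop into one accumulate of the column sum
    have hA : (fun (d : PySem.Dict String Int) (i : Int) =>
        (dict.map Prod.fst).foldl
          (fun d key =>
            let x := PySem.List.pyGetD list i ""
            let v := PySem.List.pyGetD (((PySem.Dict.mk dict).get? key).getD []) i 0
            if d.contains x = false then d.insert x v
            else d.insert x (d.getD x 0 + v)) d)
        = (fun d i => d.insert (PySem.List.pyGetD list i "")
            ((d.getD (PySem.List.pyGetD list i "") 0) +
              ((dict.map Prod.snd).map (fun vals => PySem.List.pyGetD vals i 0)).sum)) := by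
      funext d i
      have hw : ∀ kv ∈ dict, PySem.List.pyGetD (((PySem.Dict.mk dict).get? kv.1).getD []) i 0
          = PySem.List.pyGetD kv.2 i 0 := by
        intro kv hkv
        have : (PySem.Dict.mk dict).get? kv.1 = some kv.2 :=
          PySem.Dict.get?_of_mem_items (PySem.Dict.mk dict) (by simpa using hkv)
            (by simpa [PySem.Dict.keys] using hnd)
        simp [this]
      simp only []
      rw [List.foldl_map]
      have hcongr : dict.foldl
          (fun d kv =>
            if d.contains (PySem.List.pyGetD list i "") = false then
              d.insert (PySem.List.pyGetD list i "")
                (PySem.List.pyGetD (((PySem.Dict.mk dict).get? kv.1).getD []) i 0)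
            else d.insert (PySem.List.pyGetD list i "")
              (d.getD (PySem.List.pyGetD list i "") 0 +
                PySem.List.pyGetD (((PySem.Dict.mk dict).get? kv.1).getD []) i 0)) d
          = dict.foldl
          (fun d kv =>
            if d.contains (PySem.List.pyGetD list i "") = false then
              d.insert (PySem.List.pyGetD list i "") (PySem.List.pyGetD kv.2 i 0)
            else d.insert (PySem.List.pyGetD list i "")
              (d.getD (PySem.List.pyGetD list i "") 0 + PySem.List.pyGetD kv.2 i 0)) d := by
        apply PySem.List.foldl_congr_mem
        intro d' kv hkv
        rw [hw kv hkv]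
      rw [hcongr, pvInner_eq (fun kv => PySem.List.pyGetD kv.2 i 0) dict hne d
        (PySem.List.pyGetD list i "")]
      rw [show dict.map (fun kv => PySem.List.pyGetD kv.2 i 0)
            = (dict.map Prod.snd).map (fun vals => PySem.List.pyGetD vals i 0) by
          rw [List.map_map]; rfl]
    rw [hA]
    -- A's index loop as a loop over (name, column-sum) pairs, then the group lemma
    rw [show (PySem.List.pyRange 0 (list.length : Int) 1).foldl
        (fun (d : PySem.Dict String Int) i => d.insert (PySem.List.pyGetD list i "")
          ((d.getD (PySem.List.pyGetD list i "") 0) +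
            ((dict.map Prod.snd).map (fun vals => PySem.List.pyGetD vals i 0)).sum))
        PySem.Dict.empty
      = ((PySem.List.pyRange 0 (list.length : Int) 1).map
          (fun i => (PySem.List.pyGetD list i "",
            ((dict.map Prod.snd).map (fun vals => PySem.List.pyGetD vals i 0)).sum))).foldl
          (fun d p => d.insert p.1 ((fun (a : Int) (b : Int) => a + b) (d.getD p.1 0) p.2))
          PySem.Dict.empty from by rw [List.foldl_map]]
    rw [pvGroupItems 0 (fun (a : Int) (b : Int) => a + b)]
    -- B: the bucketing loop over enumerate as a loop over (name, index) pairs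
    rw [show (PySem.List.enumerate list).foldl
        (fun (d : PySem.Dict String (List Int)) p => d.insert p.2 (d.getD p.2 [] ++ [p.1]))
        PySem.Dict.empty
      = ((PySem.List.enumerate list).map (fun p => (p.2, p.1))).foldl
          (fun d p => d.insert p.1 ((fun (v : List Int) (i : Int) => v ++ [i]) (d.getD p.1 []) p.2))
          PySem.Dict.empty from by rw [List.foldl_map]]
    rw [pvGroupItems [] (fun (v : List Int) (i : Int) => v ++ [i])]
    -- both key lists are the distinct names of `list` in first-occurrence order
    simp only [List.map_map, Function.comp_def]
    rw [PySem.List.map_pyGetD_pyRange_zero' list "", PySem.List.map_snd_enumerate list 0]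
    -- the buckets: folding ++[i] from [] just rebuilds the index list
    simp only [PySem.List.foldl_append_singleton, List.nil_append]
    -- B's final loop inserts each distinct name once: fresh keys append
    have hfresh := PySem.Dict.items_foldl_insert_fresh
      (l := (PySem.Set.ofList list).map (fun x => (x,
        ((((PySem.List.enumerate list).map (fun p => (p.2, p.1))).filter
          (fun p => p.1 == x)).map (fun p => p.2)))))
      (k := Prod.fst)
      (v := fun p => (dict.map Prod.snd).foldl
        (fun t vals => t + p.2.foldl (fun t i => t + PySem.List.pyGetD vals i 0) 0) 0)
      (d := PySem.Dict.empty)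
      (by intro a _; simp)
      (by simp only [List.map_map, Function.comp_def]
          simp [PySem.Set.nodup_ofList list])
    rw [hfresh]
    simp only [List.map_map, Function.comp_def]
    have hempty : (PySem.Dict.empty : PySem.Dict String Int).items = [] := rfl
    rw [hempty, List.nil_append]
    apply List.map_congr_left
    intro x _
    simp only [Prod.mk.injEq, true_and]
    -- A's value at x: the sum of the column sums at x's indices
    rw [← List.sum_eq_foldl, List.filter_map]
    simp only [List.map_map, Function.comp_def]
    -- B's value at x: the nested sum over dict.values() and x's index bucket
    rw [PySem.List.enumerate_eq_map_pyRange list ""]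
    simp only [PySem.List.len, List.map_map, Function.comp_def, List.filter_map]
    simp only [List.map_id']
    simp only [PySem.List.foldl_add, zero_add]
    simp only [List.map_map, Function.comp_def]
    exact pvSumComm
      ((PySem.List.pyRange 0 (list.length : Int) 1).filter (fun i => PySem.List.pyGetD list i "" == x))
      dict (fun i kv => PySem.List.pyGetD kv.2 i 0)

-- ===== VERDICT (by name: the statement is the Claim_ definition above) =====
theorem matchWithZero_spec : Claim_equal_matchWithZero := by
  intro list dict _ hpre
  exact matchWithZero_spec_aux list dict hpre.1
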